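-- pv_equiv track=rewrite | github.com/2024-2-analitica-descriptiva/2024-2-LAB-01-programacion-basica-en-python-scuartasr | homework/pregunta_05.py | reducer_min
-- ===== SOURCE A (Python) =====
-- def reducer_min(lista_tupla):
--     """
--     Esta función recibe una lista de tuplas ordenadas y, para cada
--     elemento, busca el menor valor posible.
--     """
--
--     retorno = {}
--
--     # Ciclo
--     for tupla in lista_tupla:
--         if tupla[0] in retorno:
--             if tupla[1] < retorno[tupla[0]]:
--                 retorno[tupla[0]] = tupla[1]
--         else:
--             retorno[tupla[0]] = tupla[1]
--
--     return retorno
-- ===== SOURCE B (Python) =====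
-- def reducer_min(lista_tupla):
--     # Collect-then-reduce: group all values per key, then take min of each group.
--     grupos = {}
--     for tupla in lista_tupla:
--         grupos.setdefault(tupla[0], []).append(tupla[1])
--     return {clave: min(valores) for clave, valores in grupos.items()}
-- ===== Notes on version B (the rewrite author's own statement) =====
-- stated objective: alternative
-- what changed: A fuses grouping and running-min into one dict loop; B first builds a dict of per-key value lists (setdefault+append) and then produces the result with a dict comprehension taking min of each group.
import Mathlib
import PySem

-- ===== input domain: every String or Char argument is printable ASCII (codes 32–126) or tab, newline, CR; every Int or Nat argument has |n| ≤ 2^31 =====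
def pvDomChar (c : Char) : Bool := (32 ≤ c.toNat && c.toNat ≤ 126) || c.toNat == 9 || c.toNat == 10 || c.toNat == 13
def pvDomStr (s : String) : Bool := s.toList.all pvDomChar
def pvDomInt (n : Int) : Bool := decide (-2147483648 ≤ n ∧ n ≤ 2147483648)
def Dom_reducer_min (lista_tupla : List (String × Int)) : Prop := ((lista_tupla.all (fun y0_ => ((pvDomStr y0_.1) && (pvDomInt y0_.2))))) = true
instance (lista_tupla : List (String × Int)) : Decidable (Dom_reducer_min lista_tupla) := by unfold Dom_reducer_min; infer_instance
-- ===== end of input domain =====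

-- B restructures A's fused grouping+running-min dict loop into collect-then-reduce
-- (group values per key, then min of each group); same cost, alternative decomposition.

-- ===== PORT A =====
-- loop body of A (the `for tupla in lista_tupla` body)
def pvStepA (retorno : PySem.Dict String Int) (tupla : String × Int) : PySem.Dict String Int :=
  if retorno.contains tupla.1 then
    if tupla.2 < retorno.getD tupla.1 0 then retorno.insert tupla.1 tupla.2 else retorno
  else retorno.insert tupla.1 tupla.2

def reducer_min (lista_tupla : List (String × Int)) : List (String × Int) :=
  (lista_tupla.foldl pvStepA (PySem.Dict.empty : PySem.Dict String Int)).items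

-- ===== PORT B =====
-- B's first pass: grupos.setdefault(tupla[0], []).append(tupla[1])
def pvGroup (lista_tupla : List (String × Int)) : PySem.Dict String (List Int) :=
  lista_tupla.foldl (fun d p => d.modify p.1 [] (· ++ [p.2])) PySem.Dict.empty

-- min(valores); the default is never used, as every group built by pvGroup is nonempty
def pvMin (valores : List Int) : Int := (PySem.List.min? valores (fun v => v)).getD 0

def reducer_min_alt (lista_tupla : List (String × Int)) : List (String × Int) :=
  ((pvGroup lista_tupla).items.foldl
      (fun r p => r.insert p.1 (pvMin p.2))
      (PySem.Dict.empty : PySem.Dict String Int)).items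

-- ===== PRECONDITION & SPEC =====
def Spec_reducer_min (lista_tupla : List (String × Int)) (out : List (String × Int)) : Prop := out = reducer_min_alt lista_tupla
instance (lista_tupla : List (String × Int)) (out : List (String × Int)) : Decidable (Spec_reducer_min lista_tupla out) := by unfold Spec_reducer_min; infer_instance

-- ===== CLAIM (what is proved, stated in full; the proofs are below) =====
def Claim_equal_reducer_min : Prop := ∀ (lista_tupla : List (String × Int)), Dom_reducer_min lista_tupla → Spec_reducer_min lista_tupla (reducer_min lista_tupla)

-- ===== LEMMAS AND PROOFS =====

-- running minimum of a list of values, threaded through A's loop at one key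
def pvRunMin (o : Option Int) (vs : List Int) : Option Int :=
  vs.foldl (fun o v => some (match o with | none => v | some m => if v < m then v else m)) o

theorem pvRunMin_some (vs : List Int) : ∀ (m : Int),
    pvRunMin (some m) vs = some (vs.foldl (fun m v => if v < m then v else m) m) := by
  induction vs with
  | nil => intro m; rfl
  | cons v t ih => intro m; simpa [pvRunMin, List.foldl] using ih (if v < m then v else m)

-- A's lookup at key k after the loop is the running min of the values at k
theorem pvA_get? (l : List (String × Int)) : ∀ (d : PySem.Dict String Int) (k : String),
    (l.foldl pvStepA d).get? k = pvRunMin (d.get? k) ((l.filter (fun p => p.1 == k)).map (·.2)) := by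
  induction l with
  | nil => intro d k; rfl
  | cons p t ih =>
    intro d k
    by_cases hpk : p.1 = k
    · subst hpk
      have hstep : (pvStepA d p).get? p.1 =
          some (match d.get? p.1 with | none => p.2 | some m => if p.2 < m then p.2 else m) := by
        unfold pvStepA
        by_cases hc : d.contains p.1 = true
        · have hcs : (d.get? p.1).isSome = true := by
            rw [← PySem.Dict.contains_eq_isSome_get? d p.1]; exact hc
          obtain ⟨m, hm⟩ := Option.isSome_iff_exists.mp hcs
          have hgd : d.getD p.1 0 = m := PySem.Dict.getD_of_get?_eq_some d 0 hm
          rw [if_pos hc, hgd]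
          by_cases hlt : p.2 < m
          · rw [if_pos hlt, PySem.Dict.get?_insert_self, hm]
            simp [hlt]
          · rw [if_neg hlt, hm]
            simp [hlt]
        · have hc' : d.contains p.1 = false := by simpa using hc
          have hn : d.get? p.1 = none := by
            have := PySem.Dict.contains_eq_isSome_get? d p.1
            rw [hc'] at this
            exact Option.not_isSome_iff_eq_none.mp (by simp [← this])
          rw [if_neg hc, hn, PySem.Dict.get?_insert_self]
      have hfilt : (p :: t).filter (fun q => q.1 == p.1) = p :: t.filter (fun q => q.1 == p.1) := by
        simp
      rw [List.foldl_cons, ih, hstep, hfilt, List.map_cons]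
      rfl
    · have hne : (p.1 == k) = false := by simpa using hpk
      have hstep : (pvStepA d p).get? k = d.get? k := by
        unfold pvStepA
        split_ifs <;>
          first
          | rfl
          | rw [PySem.Dict.get?_insert, if_neg (fun h => hpk h.symm)]
      simp [List.foldl_cons, ih, hne, hstep]

-- the keys A accumulates are exactly the distinct first components, in first-occurrence order
theorem pvA_keys (l : List (String × Int)) : ∀ (d : PySem.Dict String Int),
    (l.foldl pvStepA d).keys = PySem.Set.update d.keys (l.map (·.1)) := by
  induction l with
  | nil => intro d; rfl
  | cons p t ih =>
    intro d
    have hstep : (pvStepA d p).keys = PySem.Set.add d.keys p.1 := by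
      unfold pvStepA
      by_cases hc : d.contains p.1 = true
      · have hmem : p.1 ∈ d.keys := (PySem.Dict.contains_iff_mem_keys d p.1).mp hc
        rw [if_pos hc]
        split_ifs <;>
          simp [PySem.Dict.keys_insert_of_contains d p.2 hc, PySem.Set.add_of_mem hmem]
      · have hnc : d.contains p.1 = false := by simpa using hc
        have hmem : p.1 ∉ d.keys := fun h => by
          simp [(PySem.Dict.contains_iff_mem_keys d p.1).mpr h] at hnc
        rw [if_neg hc, PySem.Dict.keys_insert_of_not_contains d p.2 hnc,
          PySem.Set.add_of_not_mem hmem]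
    simp only [List.foldl_cons, List.map_cons, PySem.Set.update_cons, ih, hstep]

theorem pv_filter_ne_nil (l : List (String × Int)) (k : String) (hk : k ∈ l.map (·.1)) :
    l.filter (fun p => p.1 == k) ≠ [] := by
  obtain ⟨p, hp, hpk⟩ := List.mem_map.mp hk
  have : p ∈ l.filter (fun p => p.1 == k) := List.mem_filter.mpr ⟨hp, by simp [hpk]⟩
  exact List.ne_nil_of_mem this

theorem pvRunMin_eq_pvMin (x : Int) (xs : List Int) :
    (pvRunMin none (x :: xs)).getD 0 = pvMin (x :: xs) := by
  have h1 : pvRunMin none (x :: xs) = pvRunMin (some x) xs := rfl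
  rw [h1, pvRunMin_some, pvMin, PySem.List.min?_id_cons]
  have h2 : xs.foldl (fun m v => if v < m then v else m) x = xs.foldl min x := by
    apply PySem.List.foldl_congr_mem
    intro acc v _
    simp only [min_def]
    split_ifs <;> omega
  simp [h2]

-- ===== VERDICT (by name: the statement is the Claim_ definition above) =====
theorem reducer_min_spec : Claim_equal_reducer_min := by
  intro l _
  unfold Spec_reducer_min reducer_min reducer_min_alt
  have hAkeys : (l.foldl pvStepA (PySem.Dict.empty : PySem.Dict String Int)).keys
      = PySem.Set.ofList (l.map (·.1)) := by
    rw [pvA_keys]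
    simp [PySem.Dict.keys_empty, PySem.Set.update_nil_left]
  have hAnodup : (l.foldl pvStepA (PySem.Dict.empty : PySem.Dict String Int)).keys.Nodup := by
    rw [hAkeys]; exact PySem.Set.nodup_ofList _
  have hGkeys : (pvGroup l).keys = PySem.Set.ofList (l.map (·.1)) := by
    have h := PySem.Dict.keys_foldl_modify_key l (fun p : String × Int => p.1) ([] : List Int)
      (fun _ p => (· ++ [p.2])) PySem.Dict.empty
    calc (pvGroup l).keys
        = PySem.Set.update (PySem.Dict.empty : PySem.Dict String (List Int)).keys
            (l.map (·.1)) := h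
      _ = PySem.Set.ofList (l.map (·.1)) := by
          simp [PySem.Dict.keys_empty, PySem.Set.update_nil_left]
  have hGnodup : (pvGroup l).keys.Nodup := by
    rw [hGkeys]; exact PySem.Set.nodup_ofList _
  have hGnodup' : ((pvGroup l).items.map (fun p => p.1)).Nodup := by
    simpa [PySem.Dict.keys] using hGnodup
  have hB : ((pvGroup l).items.foldl (fun r p => r.insert p.1 (pvMin p.2))
        (PySem.Dict.empty : PySem.Dict String Int)).items
      = (PySem.Dict.empty : PySem.Dict String Int).items
        ++ (pvGroup l).items.map (fun p => (p.1, pvMin p.2)) :=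
    PySem.Dict.items_foldl_insert_fresh (pvGroup l).items (fun p => p.1) (fun p => pvMin p.2)
      PySem.Dict.empty (fun a _ => by simp [PySem.Dict.contains_empty]) hGnodup'
  rw [PySem.Dict.items_eq_map_keys _ hAnodup 0, hB,
    PySem.Dict.items_eq_map_keys _ hGnodup [], hAkeys, hGkeys]
  have hEmptyItems : (PySem.Dict.empty : PySem.Dict String Int).items = [] := rfl
  rw [hEmptyItems, List.nil_append, List.map_map]
  apply List.map_congr_left
  intro k hk
  have hkmem : k ∈ l.map (·.1) := (PySem.Set.mem_ofList _ _).mp hk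
  have hGval : (pvGroup l).getD k [] = (l.filter (fun p => p.1 == k)).map (·.2) := by
    unfold pvGroup
    rw [PySem.Dict.getD_foldl_modify_append]
    simp [PySem.Dict.getD_empty]
  have hAval : (l.foldl pvStepA (PySem.Dict.empty : PySem.Dict String Int)).getD k 0
      = (pvRunMin none ((l.filter (fun p => p.1 == k)).map (·.2))).getD 0 := by
    rw [PySem.Dict.getD_eq_get?_getD, pvA_get?]
    simp [PySem.Dict.get?_empty]
  rcases hf : l.filter (fun p => p.1 == k) with _ | ⟨v, vs⟩
  · exact absurd hf (pv_filter_ne_nil l k hkmem)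
  · simp only [Function.comp, hAval, hGval, hf, List.map_cons]
    rw [pvRunMin_eq_pvMin]
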